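-- pv_equiv track=rewrite | github.com/js4000all/EasyNovelAssistant | EasyNovelAssistant/src/util_textarea.py | remove_comment_lines
-- ===== SOURCE A (Python) =====
-- import typing as ty
--
-- def remove_comment_lines(lines: ty.Iterable[str]) -> ty.Iterator[str]:
--     """
--     Remove comments from a list of strings, and return the rest as an iterator.
--     Comments are considered to be:
--     * lines that start with "//" or "@".
--     * lines below the first line that starts with "@end".
--       * Naturally, if this symbol is written multiple times, only the first one will be considered.
--     """
--     for line in lines:
--         s = line.strip()
--         if s.startswith("@end"):
--             break
--         if s.startswith("//") or s.startswith("@"):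
--             continue
--         yield line
-- ===== SOURCE B (Python) =====
-- import typing as ty
--
-- def remove_comment_lines(lines: ty.Iterable[str]) -> ty.Iterator[str]:
--     lines = list(lines)
--     end = next((i for i, l in enumerate(lines) if l.strip().startswith("@end")), len(lines))
--     return [l for l in lines[:end]
--                  if not l.strip().startswith("//") and not l.strip().startswith("@")]
-- ===== Notes on version B (the rewrite author's own statement) =====
-- stated objective: alternative
-- what changed: B replaces A's single generator loop with break/continue by a two-stage pipeline: it first locates the first '@end' line and truncates the list there, then filters comment lines with one comprehension.
import Mathlib
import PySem

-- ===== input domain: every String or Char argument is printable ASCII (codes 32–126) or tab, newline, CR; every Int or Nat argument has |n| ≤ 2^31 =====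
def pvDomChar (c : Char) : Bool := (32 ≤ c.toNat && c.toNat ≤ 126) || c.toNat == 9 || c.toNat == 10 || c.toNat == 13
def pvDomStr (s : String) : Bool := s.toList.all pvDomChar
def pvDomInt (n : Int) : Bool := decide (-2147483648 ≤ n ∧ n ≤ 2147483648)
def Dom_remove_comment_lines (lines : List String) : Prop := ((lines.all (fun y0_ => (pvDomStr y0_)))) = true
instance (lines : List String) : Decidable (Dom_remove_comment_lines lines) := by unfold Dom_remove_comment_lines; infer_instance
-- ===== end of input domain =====

-- B truncates the input at the first '@end' line and filters comments in a second pass, instead of A's single loop with break/continue; an alternative decomposition, not faster.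


-- ===== PORT A =====
def remove_comment_lines (lines : List String) : List String :=
  match lines with
  | [] => []
  | line :: rest =>
    let s := PySem.Str.strip line
    if PySem.Str.startswith s "@end" then []
    else if PySem.Str.startswith s "//" || PySem.Str.startswith s "@" then
      remove_comment_lines rest
    else line :: remove_comment_lines rest

-- ===== PORT B =====
def remove_comment_lines_alt (lines : List String) : List String :=
  let e := lines.findIdx (fun l => PySem.Str.startswith (PySem.Str.strip l) "@end")
  (lines.take e).filter
    (fun l => !PySem.Str.startswith (PySem.Str.strip l) "//"
              && !PySem.Str.startswith (PySem.Str.strip l) "@")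

-- ===== PRECONDITION & SPEC =====
def Spec_remove_comment_lines (lines : List String) (out : List String) : Prop := out = remove_comment_lines_alt lines
instance (lines : List String) (out : List String) : Decidable (Spec_remove_comment_lines lines out) := by unfold Spec_remove_comment_lines; infer_instance

-- ===== CLAIM (what is proved, stated in full; the proofs are below) =====
def Claim_equal_remove_comment_lines : Prop := ∀ (lines : List String), Dom_remove_comment_lines lines → Spec_remove_comment_lines lines (remove_comment_lines lines)

-- ===== LEMMAS AND PROOFS =====

-- ===== VERDICT (by name: the statement is the Claim_ definition above) =====
theorem rcl_eq (lines : List String) :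
    remove_comment_lines lines = remove_comment_lines_alt lines := by
  induction lines with
  | nil => rfl
  | cons line rest ih =>
    simp only [remove_comment_lines, remove_comment_lines_alt, List.findIdx_cons] at *
    by_cases hend : PySem.Str.startswith (PySem.Str.strip line) "@end"
    · simp only [hend, if_true, cond_true, List.take_zero, List.filter_nil]
    · simp only [hend, cond_false, List.take_succ_cons, List.filter_cons, ih]
      by_cases h1 : PySem.Str.startswith (PySem.Str.strip line) "//"
      · simp only [h1, Bool.true_or, if_true, Bool.not_true, Bool.false_and]
        simp
      · by_cases h2 : PySem.Str.startswith (PySem.Str.strip line) "@"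
        · simp only [h1, h2, Bool.false_or, if_true, Bool.not_true, Bool.and_false]
          simp
        · simp only [h1, h2, Bool.false_or, Bool.not_false, Bool.and_self]
          simp

theorem remove_comment_lines_spec : Claim_equal_remove_comment_lines := by
  intro lines _
  unfold Spec_remove_comment_lines
  exact (rcl_eq lines)
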